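-- pv_equiv track=rewrite | github.com/FrankJiang1208/natural-lang-processing | HW4/tagger.py | calculate_word_emission_counts
-- ===== SOURCE A (Python) =====
-- def calculate_word_emission_counts(pos_list):
--     """
--     Calculate word emission counts from training POS_list
--     Args:
--         pos_list: List where each element is ["word", "pos"] or "\n" separating sentences
--     Returns:
--         Dict of dicts. Outer dict keys: "POS", values = dicts. Inner dict keys: "word", inner dict values: emission counts of "word"
--     """
--     word_emissions = dict()
--
--     # First get the word counts
--     for elem in pos_list:
--         if elem != "\n":
--             word, pos = elem
--
--             word_emissions.setdefault(pos, {}) # add POS key to outer dict if not already included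
--
--             # add word key to POS dict, if not already included
--             word_emissions[pos].setdefault(word, 0)
--             # if word not in word_emissions[pos].keys():
--             #     word_emissions[pos][word] = 0 # initialize here; can initialize to 1 for word smoothing
--
--             # POS and word must exist by now. increment the count
--             word_emissions[pos][word] += 1
--
--     return word_emissions
-- ===== SOURCE B (Python) =====
-- def _freq(words):
--     counts = {}
--     for w in words:
--         counts[w] = counts.get(w, 0) + 1
--     return counts
--
--
-- def calculate_word_emission_counts(pos_list):
--     # Phase 1: group words per tag, preserving first-appearance order.
--     buckets = {}
--     for elem in pos_list:
--         if elem != "\n":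
--             word, pos = elem
--             buckets.setdefault(pos, []).append(word)
--     # Phase 2: turn each bucket into a frequency dict.
--     return {pos: _freq(words) for pos, words in buckets.items()}
-- ===== Notes on version B (the rewrite author's own statement) =====
-- stated objective: alternative
-- what changed: A increments nested dict counts element-by-element in one loop; B first groups words into per-tag buckets in one pass, then turns each bucket into a frequency dict in a second phase.
import Mathlib
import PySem

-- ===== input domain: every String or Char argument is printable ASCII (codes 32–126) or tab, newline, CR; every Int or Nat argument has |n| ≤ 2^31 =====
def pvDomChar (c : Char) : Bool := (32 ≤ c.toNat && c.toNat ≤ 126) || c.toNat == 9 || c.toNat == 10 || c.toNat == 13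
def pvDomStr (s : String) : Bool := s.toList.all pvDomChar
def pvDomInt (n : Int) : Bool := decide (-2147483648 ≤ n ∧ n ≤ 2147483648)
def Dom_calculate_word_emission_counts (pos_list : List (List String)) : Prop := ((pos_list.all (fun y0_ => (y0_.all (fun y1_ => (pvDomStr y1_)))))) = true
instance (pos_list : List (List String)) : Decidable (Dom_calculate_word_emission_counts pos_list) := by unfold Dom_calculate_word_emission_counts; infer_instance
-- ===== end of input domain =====

-- B replaces A's per-element nested setdefault/increment updates by a two-phase decomposition:
-- first group all words per tag into buckets, then count each bucket once (objective: alternative).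

-- ===== PORT A =====
-- Port of A: one fold over pos_list maintaining the nested dict; elements that are not
-- two-element lists are where Python A raises (ValueError on unpacking) — excluded by Pre_;
-- the port leaves the state unchanged there. (In the typed domain every elem is a list, so
-- Python's `elem != "\n"` guard is always true and has no counterpart here.)
def pvStepA (d : PySem.Dict String (PySem.Dict String Int)) (elem : List String) :
    PySem.Dict String (PySem.Dict String Int) :=
  match elem with
  | [word, pos] =>
    let d1 := d.setdefault pos PySem.Dict.empty          -- word_emissions.setdefault(pos, {})
    let inner := d1.getD pos PySem.Dict.empty            -- word_emissions[pos]
    let inner1 := inner.setdefault word 0                -- .setdefault(word, 0)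
    let inner2 := inner1.insert word (inner1.getD word 0 + 1)  -- [word] += 1
    d1.insert pos inner2
  | _ => d

def calculate_word_emission_counts (pos_list : List (List String)) : List (String × List (String × Int)) :=
  (pos_list.foldl pvStepA
    (PySem.Dict.empty : PySem.Dict String (PySem.Dict String Int))).items.map
      (fun p => (p.1, p.2.items))

-- ===== PORT B =====
-- counts[w] = counts.get(w, 0) + 1 over the bucket
def pvFreq (words : List String) : PySem.Dict String Int :=
  words.foldl (fun counts w => counts.insert w (counts.getD w 0 + 1)) PySem.Dict.empty

def pvBucketStep (b : PySem.Dict String (List String)) (elem : List String) :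
    PySem.Dict String (List String) :=
  match elem with
  | word :: pos :: [] => b.modify pos [] (· ++ [word])       -- buckets.setdefault(pos, []).append(word)
  | _ => b

def calculate_word_emission_counts_alt (pos_list : List (List String)) : List (String × List (String × Int)) :=
  let buckets := pos_list.foldl pvBucketStep
    (PySem.Dict.empty : PySem.Dict String (List String))
  buckets.items.map (fun p => (p.1, (pvFreq p.2).items))     -- {pos: _freq(words) …}

-- ===== PRECONDITION & SPEC =====
-- Pre_ excludes exactly the inputs where Python A raises: an element that is not a
-- two-element list makes `word, pos = elem` raise ValueError.
def Pre_calculate_word_emission_counts (pos_list : List (List String)) : Prop :=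
  ∀ elem ∈ pos_list, elem.length = 2
instance (pos_list : List (List String)) : Decidable (Pre_calculate_word_emission_counts pos_list) := by
  unfold Pre_calculate_word_emission_counts; infer_instance
def pvWitness_calculate_word_emission_counts : List (List String) :=
  [["the", "DT"], ["dog", "NN"], ["the", "DT"]]
def Spec_calculate_word_emission_counts (pos_list : List (List String)) (out : List (String × List (String × Int))) : Prop := out = calculate_word_emission_counts_alt pos_list
instance (pos_list : List (List String)) (out : List (String × List (String × Int))) : Decidable (Spec_calculate_word_emission_counts pos_list out) := by unfold Spec_calculate_word_emission_counts; infer_instance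

-- ===== CLAIM (what is proved, stated in full; the proofs are below) =====
def Claim_equal_calculate_word_emission_counts : Prop := ∀ (pos_list : List (List String)), Dom_calculate_word_emission_counts pos_list → Pre_calculate_word_emission_counts pos_list → Spec_calculate_word_emission_counts pos_list (calculate_word_emission_counts pos_list)

-- ===== LEMMAS AND PROOFS =====

-- Mapping a function over the values of an assoc list commutes with lookup.
theorem pv_get?_mk_map {α β : Type} (l : List (String × α)) (g : α → β) (k : String) :
    (PySem.Dict.mk (l.map (fun q => (q.1, g q.2)))).get? k
      = ((PySem.Dict.mk l).get? k).map g := by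
  induction l with
  | nil => rfl
  | cons p rest ih =>
      obtain ⟨k1, v1⟩ := p
      simp only [List.map_cons, PySem.Dict.get?_mk_cons]
      by_cases h : k1 == k
      · simp [h]
      · simp [h, ih]

-- F turns a bucket dict into the nested count dict, key order preserved.
def pvF (b : PySem.Dict String (List String)) : PySem.Dict String (PySem.Dict String Int) :=
  PySem.Dict.mk (b.items.map (fun q => (q.1, pvFreq q.2)))

theorem pvF_get? (b : PySem.Dict String (List String)) (k : String) :
    (pvF b).get? k = (b.get? k).map pvFreq := by
  cases b with
  | mk l => exact pv_get?_mk_map l pvFreq k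

theorem pvF_contains (b : PySem.Dict String (List String)) (k : String) :
    (pvF b).contains k = b.contains k := by
  rw [PySem.Dict.contains_eq_isSome_get?, PySem.Dict.contains_eq_isSome_get?, pvF_get?]
  cases b.get? k <;> rfl

theorem pvF_getD (b : PySem.Dict String (List String)) (k : String) :
    (pvF b).getD k PySem.Dict.empty = pvFreq (b.getD k []) := by
  rw [PySem.Dict.getD_eq_get?_getD, PySem.Dict.getD_eq_get?_getD, pvF_get?]
  cases b.get? k <;> rfl

-- setdefault followed by an overwrite at the same key is just the overwrite
theorem pv_setdefault_insert {ν : Type} (d : PySem.Dict String ν) (k : String) (v x : ν) :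
    (d.setdefault k v).insert k x = d.insert k x := by
  by_cases h : d.contains k = true
  · rw [PySem.Dict.setdefault_of_contains d v h]
  · rw [PySem.Dict.setdefault_of_not_contains d v (by simpa using h),
        PySem.Dict.insert_insert_self]

-- A's inner setdefault/increment equals a single counting insert
theorem pv_inner_step (i : PySem.Dict String Int) (w : String) :
    (i.setdefault w 0).insert w ((i.setdefault w 0).getD w 0 + 1)
      = i.insert w (i.getD w 0 + 1) := by
  by_cases h : i.contains w = true
  · rw [PySem.Dict.setdefault_of_contains i 0 h]
  · have h' : i.contains w = false := by simpa using h
    rw [PySem.Dict.setdefault_of_not_contains i 0 h',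
        PySem.Dict.getD_insert_self, PySem.Dict.insert_insert_self,
        PySem.Dict.getD_of_not_contains i 0 h']

theorem pvFreq_snoc (ws : List String) (w : String) :
    pvFreq (ws ++ [w]) = (pvFreq ws).insert w ((pvFreq ws).getD w 0 + 1) := by
  simp [pvFreq, List.foldl_append]

-- one step of A's loop on (pvF b) equals pvF of one step of B's loop
theorem pv_step (b : PySem.Dict String (List String)) (w p : String) :
    ((pvF b).setdefault p PySem.Dict.empty).insert p
      (let inner := ((pvF b).setdefault p PySem.Dict.empty).getD p PySem.Dict.empty
       let inner1 := inner.setdefault w 0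
       inner1.insert w (inner1.getD w 0 + 1))
      = pvF (b.modify p [] (· ++ [w])) := by
  have hmod : b.modify p [] (· ++ [w]) = b.insert p (b.getD p [] ++ [w]) := rfl
  have hinner : ((pvF b).setdefault p PySem.Dict.empty).getD p PySem.Dict.empty
      = pvFreq (b.getD p []) := by
    rw [PySem.Dict.getD_setdefault_self, pvF_getD]
  rw [pv_setdefault_insert]
  simp only [hinner, pv_inner_step, ← pvFreq_snoc, hmod]
  -- remaining: (pvF b).insert p (pvFreq (b.getD p [] ++ [w])) = pvF (b.insert p (b.getD p [] ++ [w]))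
  by_cases h : b.contains p = true
  · apply PySem.Dict.ext
    rw [PySem.Dict.items_insert_of_contains _ _ ((pvF_contains b p).trans h)]
    simp only [pvF, PySem.Dict.items_insert_of_contains _ _ h]
    simp only [List.map_map]
    apply List.map_congr_left
    intro q _
    by_cases hq : q.1 = p
    · simp [hq]
    · simp [hq, Function.comp]
  · have h' : b.contains p = false := by simpa using h
    apply PySem.Dict.ext
    rw [PySem.Dict.items_insert_of_not_contains _ _ ((pvF_contains b p).trans h')]
    simp only [pvF, PySem.Dict.items_insert_of_not_contains _ _ h']
    rw [PySem.Dict.getD_of_not_contains b ([]:List String) h']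
    simp

theorem pv_fold (l : List (List String)) (b : PySem.Dict String (List String)) :
    l.foldl pvStepA (pvF b) = pvF (l.foldl pvBucketStep b) := by
  induction l generalizing b with
  | nil => rfl
  | cons e rest ih =>
      match e with
      | [] => simpa [pvStepA, pvBucketStep] using ih b
      | [w] => simpa [pvStepA, pvBucketStep] using ih b
      | [w, p] =>
          simp only [List.foldl_cons]
          have hstep : pvStepA (pvF b) [w, p] = pvF (pvBucketStep b [w, p]) := by
            simpa [pvStepA, pvBucketStep] using pv_step b w p
          rw [hstep]; exact ih (pvBucketStep b [w, p])
      | w :: p :: x :: t => simpa [pvStepA, pvBucketStep] using ih b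

-- ===== VERDICT (by name: the statement is the Claim_ definition above) =====
theorem calculate_word_emission_counts_spec : Claim_equal_calculate_word_emission_counts := by
  intro pos_list _ _
  unfold Spec_calculate_word_emission_counts
  unfold calculate_word_emission_counts calculate_word_emission_counts_alt
  have h := pv_fold pos_list PySem.Dict.empty
  simp only [show pvF PySem.Dict.empty = PySem.Dict.empty from rfl] at h
  rw [h]
  simp [pvF]
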